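-- pv_equiv track=rewrite | github.com/zenil-colab/bias-in-science-communication | code/analysis_and_output/top_10_mentions_percentage.py | merge_lastname_variants
-- ===== SOURCE A (Python) =====
-- from collections import Counter
--
-- def merge_lastname_variants(counter):
--     merged = Counter(counter)
--     for name in list(counter.keys()):
--         parts = name.split()
--         if len(parts) == 1:
--             for candidate in counter:
--                 if parts[0] in candidate.split() and candidate != name:
--                     merged[candidate] += counter[name]
--                     merged.pop(name, None)
--                     break
--     return merged
-- ===== SOURCE B (Python) =====
-- def merge_lastname_variants(counter):
--     merged = dict(counter)
--     index = {}
--     for cand in counter: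
--         for tok in dict.fromkeys(cand.split()):
--             index.setdefault(tok, []).append(cand)
--     for name in counter:
--         parts = name.split()
--         if len(parts) == 1:
--             for cand in index.get(parts[0], []):
--                 if cand != name:
--                     merged[cand] = merged.get(cand, 0) + counter[name]
--                     merged.pop(name, None)
--                     break
--     return merged
-- ===== Notes on version B (the rewrite author's own statement) =====
-- stated objective: faster
-- what changed: B builds a token-to-names index in one pass (dict.fromkeys-deduped tokens, setdefault append) so each single-word name finds its first matching multi-word candidate by a direct index lookup instead of A's inner scan over all names with re-split of every candidate.
import Mathlib
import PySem

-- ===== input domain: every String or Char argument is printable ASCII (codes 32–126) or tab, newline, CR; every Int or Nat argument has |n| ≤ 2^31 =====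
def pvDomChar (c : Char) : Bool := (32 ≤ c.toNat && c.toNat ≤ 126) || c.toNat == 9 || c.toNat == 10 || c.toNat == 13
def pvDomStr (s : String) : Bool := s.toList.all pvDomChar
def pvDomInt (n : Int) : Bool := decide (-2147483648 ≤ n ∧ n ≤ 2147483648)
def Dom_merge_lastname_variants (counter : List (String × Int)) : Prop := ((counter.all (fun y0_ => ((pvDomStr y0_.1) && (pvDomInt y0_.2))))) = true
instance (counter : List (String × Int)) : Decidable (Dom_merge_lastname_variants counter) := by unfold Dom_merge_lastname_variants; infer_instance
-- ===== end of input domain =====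

-- B replaces A's quadratic inner scan over all names by a token→names index built once,
-- so each single-word name looks up its candidates directly (objective: faster).
-- The dict argument is modelled as PySem.Dict.ofList of the association list; both ports are total.

-- ===== PORT A =====
-- inner loop 'for candidate in counter: if parts[0] in candidate.split() and candidate != name: … break'
-- = first candidate (in dict order) matching the test; the updates happen at the break site.
def pvACand (w name : String) : List String → Option String
  | [] => none
  | c :: rest =>
    if (PySem.Str.split₀ c).contains w && c != name then some c else pvACand w name rest

def merge_lastname_variants (counter : List (String × Int)) : List (String × Int) :=
  let cd := PySem.Dict.ofList counter            -- the Python dict argument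
  let merged := cd.keys.foldl (fun m name =>     -- for name in list(counter.keys())
    match PySem.Str.split₀ name with             -- parts = name.split(); len(parts) == 1 → parts[0]
    | [w] =>
      match pvACand w name cd.keys with
      | some c =>
        -- merged[candidate] += counter[name]; merged.pop(name, None)
        (m.modify c 0 (· + cd.getD name 0)).erase name
      | none => m
    | _ => m) cd                                 -- merged = Counter(counter)
  merged.items

-- ===== PORT B =====
def merge_lastname_variants_alt (counter : List (String × Int)) : List (String × Int) :=
  let cd := PySem.Dict.ofList counter            -- merged = dict(counter)
  -- index: token → names containing that token, in insertion order
  let index : PySem.Dict String (List String) :=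
    cd.keys.foldl (fun ix cand =>
      (PySem.List.dedup (PySem.Str.split₀ cand)).foldl    -- for tok in dict.fromkeys(cand.split())
        (fun ix tok => ix.modify tok [] (· ++ [cand])) ix)  -- index.setdefault(tok, []).append(cand)
      PySem.Dict.empty
  let merged := cd.keys.foldl (fun m name =>     -- for name in counter
    let parts := PySem.Str.split₀ name
    if parts.length == 1 then
      -- first cand != name in the index entry, if any; the updates happen at the break site
      ((index.getD (parts.headD "") []).find? (fun c => c != name)).elim m
        (fun c =>
          -- merged[cand] = merged.get(cand, 0) + counter[name]; merged.pop(name, None)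
          (m.insert c (m.getD c 0 + cd.getD name 0)).erase name)
    else m) cd
  merged.items

-- ===== PRECONDITION & SPEC =====
def Spec_merge_lastname_variants (counter : List (String × Int)) (out : List (String × Int)) : Prop := out = merge_lastname_variants_alt counter
instance (counter : List (String × Int)) (out : List (String × Int)) : Decidable (Spec_merge_lastname_variants counter out) := by unfold Spec_merge_lastname_variants; infer_instance

-- ===== CLAIM (what is proved, stated in full; the proofs are below) =====
def Claim_equal_merge_lastname_variants : Prop := ∀ (counter : List (String × Int)), Dom_merge_lastname_variants counter → Spec_merge_lastname_variants counter (merge_lastname_variants counter)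

-- ===== LEMMAS AND PROOFS =====

-- On a duplicate-free list, filtering for equality with w yields [w] iff w occurs.
theorem pv_filter_nodup_eq {ts : List String} (w : String) (h : ts.Nodup) :
    ts.filter (· == w) = if w ∈ ts then [w] else [] := by
  induction ts with
  | nil => simp
  | cons t rest ih =>
    rcases List.nodup_cons.mp h with ⟨hni, hnd⟩
    by_cases htw : t = w
    · subst htw
      simp [hni, ih hnd]
    · simp [htw, ih hnd, Ne.symm htw]

-- One candidate's contribution to the index: appends the candidate to entry w iff w is one of its tokens.
theorem pv_index_step (c w : String) (ix : PySem.Dict String (List String)) :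
    ((PySem.List.dedup (PySem.Str.split₀ c)).foldl
      (fun ix tok => ix.modify tok [] (· ++ [c])) ix).getD w []
    = ix.getD w [] ++ (if (PySem.Str.split₀ c).contains w then [c] else []) := by
  have hmap : (PySem.List.dedup (PySem.Str.split₀ c)).foldl
      (fun ix tok => ix.modify tok [] (· ++ [c])) ix
      = ((PySem.List.dedup (PySem.Str.split₀ c)).map (fun t => (t, c))).foldl
          (fun ix p => ix.modify p.1 [] (· ++ [p.2])) ix := by
    rw [List.foldl_map]
  rw [hmap, PySem.Dict.getD_foldl_modify_append, List.filter_map]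
  have : ((PySem.List.dedup (PySem.Str.split₀ c)).filter
      ((fun p => p.1 == w) ∘ fun t => (t, c))) = (PySem.List.dedup (PySem.Str.split₀ c)).filter (· == w) := rfl
  rw [this, pv_filter_nodup_eq w (PySem.List.nodup_dedup _)]
  by_cases hw : w ∈ PySem.Str.split₀ c
  · simp [hw]
  · simp [hw]

-- The finished index at token w lists, in order, exactly the names whose split contains w.
theorem pv_index_spec (l : List String) (w : String) (ix : PySem.Dict String (List String)) :
    (l.foldl (fun ix cand =>
        (PySem.List.dedup (PySem.Str.split₀ cand)).foldl
          (fun ix tok => ix.modify tok [] (· ++ [cand])) ix) ix).getD w []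
    = ix.getD w [] ++ l.filter (fun c => (PySem.Str.split₀ c).contains w) := by
  induction l generalizing ix with
  | nil => simp
  | cons c rest ih =>
    rw [List.foldl_cons, ih, pv_index_step, List.filter_cons]
    by_cases hw : w ∈ PySem.Str.split₀ c
    · simp [hw]
    · simp [hw]

-- A's inner scan is the first element of the index entry that differs from name.
theorem pv_find_eq (keys : List String) (w name : String) :
    pvACand w name keys
      = (keys.filter (fun c => (PySem.Str.split₀ c).contains w)).find? (fun c => c != name) := by
  induction keys with
  | nil => rfl
  | cons c rest ih =>
    rw [pvACand, List.filter_cons]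
    by_cases hw : w ∈ PySem.Str.split₀ c
    · by_cases hn : c = name
      · subst hn; simp [hw, ih]
      · simp [hw, hn]
    · simp [hw, ih]

-- ===== VERDICT (by name: the statement is the Claim_ definition above) =====
theorem merge_lastname_variants_spec : Claim_equal_merge_lastname_variants := by
  intro counter _
  unfold Spec_merge_lastname_variants merge_lastname_variants merge_lastname_variants_alt
  simp only []
  apply congrArg PySem.Dict.items
  apply PySem.List.foldl_congr_mem
  intro m name _
  cases hparts : PySem.Str.split₀ name with
  | nil => rfl
  | cons w rest =>
    cases rest with
    | cons _ _ => rfl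
    | nil =>
      simp only [List.length_cons, List.length_nil, List.headD_cons, beq_self_eq_true, if_true]
      rw [pv_index_spec, PySem.Dict.getD_empty, List.nil_append, ← pv_find_eq]
      cases pvACand w name (PySem.Dict.ofList counter).keys <;> rfl
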